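-- pv_equiv track=rewrite | github.com/zeus6768/codingtest | baekjoon/solved/11497.py | get_best_array
-- ===== SOURCE A (Python) =====
-- def get_best_array(trees):
-- 	size = len(trees)
-- 	new_trees = [0]*size
-- 	l, r = 0, size-1
-- 	for i in range(size):
-- 		if i % 2:
-- 			new_trees[r] = trees[i]
-- 			r -= 1
-- 		else:
-- 			new_trees[l] = trees[i]
-- 			l += 1
-- 	return new_trees
-- ===== SOURCE B (Python) =====
-- def get_best_array(trees):
--     # Closed-form permutation: output position j holds trees[2*j] in the first
--     # ceil(n/2) slots and trees[2*(n-1-j)+1] in the remaining slots.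
--     n = len(trees)
--     h = (n + 1) // 2
--     return [trees[2 * j] if j < h else trees[2 * (n - 1 - j) + 1] for j in range(n)]
-- ===== Notes on version B (the rewrite author's own statement) =====
-- stated objective: alternative
-- what changed: Replaces A's stateful scatter loop (two write pointers routing each input element into a preallocated array) by a closed-form gather: for each output position j a direct index formula (trees[2*j] for j < ceil(n/2), trees[2*(n-1-j)+1] otherwise) computed in one comprehension, with no pointers or mutation.
import Mathlib
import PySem

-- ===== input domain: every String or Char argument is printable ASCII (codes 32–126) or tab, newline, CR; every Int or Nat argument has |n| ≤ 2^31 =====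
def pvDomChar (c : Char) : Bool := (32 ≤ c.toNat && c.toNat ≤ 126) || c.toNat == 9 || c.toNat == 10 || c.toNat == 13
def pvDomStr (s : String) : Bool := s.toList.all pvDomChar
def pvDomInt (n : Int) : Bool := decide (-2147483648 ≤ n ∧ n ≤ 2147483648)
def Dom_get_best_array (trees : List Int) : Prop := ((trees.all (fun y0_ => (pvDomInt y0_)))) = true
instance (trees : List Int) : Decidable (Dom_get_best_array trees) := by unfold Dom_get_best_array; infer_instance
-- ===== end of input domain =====

-- B replaces A's scatter loop (two write pointers into a preallocated array) by a closed-form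
-- gather: each output position is computed directly by an index formula (objective: alternative).

-- ===== PORT A =====
-- literal port of A: preallocated zero array, pointers l/r, loop over range(size)
def get_best_array (trees : List Int) : List Int :=
  let size : Int := (trees.length : Int)
  let st :=
    (PySem.List.pyRange 0 size 1).foldl
      (fun (st : List Int × Int × Int) (i : Int) =>
        if PySem.Int.mod i 2 ≠ 0 then
          (PySem.List.pySetD st.1 st.2.2 (PySem.List.pyGetD trees i 0), st.2.1, st.2.2 - 1)
        else
          (PySem.List.pySetD st.1 st.2.1 (PySem.List.pyGetD trees i 0), st.2.1 + 1, st.2.2))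
      (List.replicate trees.length 0, 0, size - 1)
  st.1

-- ===== PORT B =====
-- literal port of B: comprehension over range(n) gathering by the closed-form index formula
def get_best_array_alt (trees : List Int) : List Int :=
  let n : Int := (trees.length : Int)
  let h : Int := PySem.Int.floordiv (n + 1) 2
  (PySem.List.pyRange 0 n 1).map (fun j =>
    if j < h then PySem.List.pyGetD trees (2 * j) 0
    else PySem.List.pyGetD trees (2 * (n - 1 - j) + 1) 0)

-- ===== PRECONDITION & SPEC =====
def Spec_get_best_array (trees : List Int) (out : List Int) : Prop := out = get_best_array_alt trees
instance (trees : List Int) (out : List Int) : Decidable (Spec_get_best_array trees out) := by unfold Spec_get_best_array; infer_instance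

-- ===== CLAIM (what is proved, stated in full; the proofs are below) =====
def Claim_equal_get_best_array : Prop := ∀ (trees : List Int), Dom_get_best_array trees → Spec_get_best_array trees (get_best_array trees)

-- ===== LEMMAS AND PROOFS =====

-- A's loop step, named for the proofs (definitionally the port's lambda)
def pvStepA (trees : List Int) (st : List Int × Int × Int) (i : Int) : List Int × Int × Int :=
  if PySem.Int.mod i 2 ≠ 0 then
    (PySem.List.pySetD st.1 st.2.2 (PySem.List.pyGetD trees i 0), st.2.1, st.2.2 - 1)
  else
    (PySem.List.pySetD st.1 st.2.1 (PySem.List.pyGetD trees i 0), st.2.1 + 1, st.2.2)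

-- the even-indexed prefix and odd-indexed suffix of A's output, in closed form
def pvFront (trees : List Int) (k : Nat) : List Int :=
  (List.range ((k + 1) / 2)).map (fun j => trees.getD (2 * j) 0)
def pvBack (trees : List Int) (k : Nat) : List Int :=
  (List.range (k / 2)).map (fun j => trees.getD (2 * j + 1) 0)

lemma pv_set_mid (l₁ l₂ : List Int) (x v : Int) :
    (l₁ ++ x :: l₂).set l₁.length v = l₁ ++ v :: l₂ := by
  rw [List.set_append_right _ _ (le_refl _)]; simp

-- joint invariant: after k iterations A's state is (front ++ zeros ++ back.reverse, |front|, size-1-|back|)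
lemma pv_inv (trees : List Int) (k : Nat) (hk : k ≤ trees.length) :
    (PySem.List.pyRange 0 (k : Int) 1).foldl (pvStepA trees)
      (List.replicate trees.length 0, 0, (trees.length : Int) - 1)
    = (pvFront trees k ++ List.replicate (trees.length - k) 0 ++ (pvBack trees k).reverse,
       ((pvFront trees k).length : Int), (trees.length : Int) - 1 - (pvBack trees k).length) := by
  induction k with
  | zero => simp [pvFront, pvBack, PySem.List.pyRange_one_eq_nil (le_refl 0)]
  | succ k ih =>
    have hk' : k < trees.length := hk
    have h1 := ih (by omega)
    have hr : (((k : Nat) + 1 : Nat) : Int) = (k : Int) + 1 := by push_cast; ring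
    rw [hr, PySem.List.pyRange_one_succ_right (by positivity), List.foldl_append, h1,
      List.foldl_cons, List.foldl_nil]
    have hmod : PySem.Int.mod (k : Int) 2 = ((k % 2 : Nat) : Int) := PySem.Int.mod_natCast k 2
    have hget : PySem.List.pyGetD trees (k : Int) 0 = trees.getD k 0 := by
      rw [PySem.List.pyGetD_natCast]
    have hlf : (pvFront trees k).length = (k + 1) / 2 := by simp [pvFront]
    have hlb : (pvBack trees k).length = k / 2 := by simp [pvBack]
    have hrep : trees.length - k = (trees.length - (k + 1)) + 1 := by omega
    rcases Nat.even_or_odd k with he | ho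
    · -- k even: else branches
      have hk2 : k % 2 = 0 := Nat.even_iff.mp he
      have hcond : ¬ (PySem.Int.mod (k : Int) 2 ≠ 0) := by rw [hmod, hk2]; simp
      simp only [pvStepA, if_neg hcond, Prod.mk.injEq]
      have ef1 : (k + 1 + 1) / 2 = (k + 1) / 2 + 1 := by omega
      have ef2 : 2 * ((k + 1) / 2) = k := by omega
      have efr : pvFront trees (k + 1) = pvFront trees k ++ [trees.getD k 0] := by
        simp only [pvFront, ef1, List.range_succ, List.map_append, List.map_cons, List.map_nil, ef2]
      have ebk : pvBack trees (k + 1) = pvBack trees k := by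
        simp only [pvBack, show (k + 1) / 2 = k / 2 by omega]
      refine ⟨?_, ?_, ?_⟩
      · rw [PySem.List.pySetD_natCast, hget, hrep, List.replicate_succ,
          show pvFront trees k ++ ((0 : Int) :: List.replicate (trees.length - (k + 1)) 0) ++ (pvBack trees k).reverse
            = pvFront trees k ++ (0 : Int) :: (List.replicate (trees.length - (k + 1)) 0 ++ (pvBack trees k).reverse) by simp,
          pv_set_mid, efr, ebk]
        simp
      · rw [efr]; simp
      · rw [ebk]
    · -- k odd: then branches
      have hk2 : k % 2 = 1 := Nat.odd_iff.mp ho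
      have hcond : PySem.Int.mod (k : Int) 2 ≠ 0 := by rw [hmod, hk2]; simp
      simp only [pvStepA, if_pos hcond, Prod.mk.injEq]
      have eb1 : (k + 1) / 2 = k / 2 + 1 := by omega
      have eb2 : 2 * (k / 2) + 1 = k := by omega
      have ebk : pvBack trees (k + 1) = pvBack trees k ++ [trees.getD k 0] := by
        simp only [pvBack, eb1, List.range_succ, List.map_append, List.map_cons, List.map_nil, eb2]
      have efr : pvFront trees (k + 1) = pvFront trees k := by
        simp only [pvFront, show (k + 1 + 1) / 2 = (k + 1) / 2 by omega]
      refine ⟨?_, ?_, ?_⟩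
      · have hnn : (0 : Int) ≤ (trees.length : Int) - 1 - ((pvBack trees k).length : Int) := by
          rw [hlb]; push_cast; omega
        rw [PySem.List.pySetD_of_nonneg _ _ hnn, hget]
        have htn : ((trees.length : Int) - 1 - ((pvBack trees k).length : Int)).toNat
            = (pvFront trees k ++ List.replicate (trees.length - (k + 1)) 0).length := by
          simp [hlf, hlb]; omega
        rw [hrep, List.replicate_succ',
          show pvFront trees k ++ (List.replicate (trees.length - (k + 1)) 0 ++ [(0 : Int)]) ++ (pvBack trees k).reverse
            = (pvFront trees k ++ List.replicate (trees.length - (k + 1)) 0) ++ ((0 : Int) :: (pvBack trees k).reverse) by simp,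
          htn, pv_set_mid, efr, ebk]
        simp
      · rw [efr]
      · rw [ebk]; simp [List.length_append]; ring

lemma pv_main (trees : List Int) : get_best_array trees = get_best_array_alt trees := by
  have ha : get_best_array trees
      = ((PySem.List.pyRange 0 ((trees.length : Int)) 1).foldl (pvStepA trees)
          (List.replicate trees.length 0, 0, (trees.length : Int) - 1)).1 := rfl
  rw [ha, pv_inv trees trees.length le_rfl]
  simp only [Nat.sub_self, List.replicate_zero, List.append_nil]
  -- RHS: unfold the gather comprehension
  have hH : PySem.Int.floordiv ((trees.length : Int) + 1) 2
      = (((trees.length + 1) / 2 : Nat) : Int) := by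
    rw [PySem.Int.floordiv_eq_ediv_of_pos (by omega)]; omega
  have hb : get_best_array_alt trees
      = (List.range trees.length).map (fun i =>
          if ((i : Nat) : Int) < (((trees.length + 1) / 2 : Nat) : Int)
          then PySem.List.pyGetD trees (2 * (i : Int)) 0
          else PySem.List.pyGetD trees (2 * ((trees.length : Int) - 1 - (i : Int)) + 1) 0) := by
    simp only [get_best_array_alt, hH, PySem.List.pyRange_one, Int.sub_zero, Int.toNat_natCast,
      List.map_map]
    apply List.map_congr_left
    intro i _
    simp
  rw [hb]
  set n := trees.length with hn
  set h' := (n + 1) / 2 with hh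
  apply List.ext_getElem
  · simp [pvFront, pvBack]; omega
  · intro i hiL hiR
    have hin : i < n := by simpa using hiR
    rw [List.getElem_map, List.getElem_range]
    by_cases hi : i < h'
    · have hflen : i < (pvFront trees n).length := by simp [pvFront]; omega
      rw [List.getElem_append_left hflen]
      have hcond : ((i : Nat) : Int) < ((h' : Nat) : Int) := by exact_mod_cast hi
      rw [if_pos hcond]
      have : (2 : Int) * (i : Int) = ((2 * i : Nat) : Int) := by push_cast; ring
      rw [this, PySem.List.pyGetD_natCast]
      simp [pvFront]
    · have hflen : (pvFront trees n).length ≤ i := by simp [pvFront]; omega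
      rw [List.getElem_append_right hflen]
      have hcond : ¬ (((i : Nat) : Int) < ((h' : Nat) : Int)) := by
        exact_mod_cast hi
      rw [if_neg hcond]
      have hbl : (pvBack trees n).length = n / 2 := by simp [pvBack]
      rw [List.getElem_reverse]
      have hInt : (2 : Int) * ((n : Int) - 1 - (i : Int)) + 1 = ((2 * (n - 1 - i) + 1 : Nat) : Int) := by
        push_cast [Nat.cast_sub (by omega : i ≤ n - 1), Nat.cast_sub (by omega : 1 ≤ n)]; ring
      rw [hInt, PySem.List.pyGetD_natCast]
      have hidx : (pvBack trees n).length - 1 - (i - (pvFront trees n).length) < (pvBack trees n).length := by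
        simp [pvFront, pvBack]; omega
      simp only [pvBack, List.getElem_map, List.getElem_range]
      congr 2
      simp only [pvFront, List.length_map, List.length_range, List.length_map, List.length_range] at *
      omega

-- ===== VERDICT (by name: the statement is the Claim_ definition above) =====
theorem get_best_array_spec : Claim_equal_get_best_array := by
  intro trees _
  exact pv_main trees
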